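-- pv_equiv track=rewrite | github.com/CIROH-UVM/forecast-workflow | data/gfs_download_fcns.py | generate_hours_list
-- ===== SOURCE A (Python) =====
-- def generate_hours_list(num_hours=168, archive=False):
--     if archive:
--         return [f"{hour:03}" for hour in range(0, num_hours + 1, 3)]
--     if not archive:
--         if num_hours <= 120:
--             return [f"{hour:03}" for hour in range(0, num_hours + 1)]
--         else:
--             return [f"{hour:03}" for hour in range(0, 120)] + [
--                 f"{hour:03}" for hour in range(120, num_hours + 1, 3)
--             ]
-- ===== SOURCE B (Python) =====
-- def generate_hours_list(num_hours=168, archive=False):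
--     if archive:
--         return [f"{hour:03}" for hour in range(0, num_hours + 1, 3)]
--     hours = []
--     hour = 0
--     while hour <= num_hours:
--         hours.append(f"{hour:03}")
--         hour += 1 if hour < 120 else 3
--     return hours
-- ===== Notes on version B (the rewrite author's own statement) =====
-- stated objective: alternative
-- what changed: The non-archive case's two concatenated range comprehensions (step-1 up to 119, then step-3 from 120) are replaced by one while loop with an adaptive step (1 below 120, 3 from 120 on), so there is a single pass and no <=120/ >120 branch.
import Mathlib
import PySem

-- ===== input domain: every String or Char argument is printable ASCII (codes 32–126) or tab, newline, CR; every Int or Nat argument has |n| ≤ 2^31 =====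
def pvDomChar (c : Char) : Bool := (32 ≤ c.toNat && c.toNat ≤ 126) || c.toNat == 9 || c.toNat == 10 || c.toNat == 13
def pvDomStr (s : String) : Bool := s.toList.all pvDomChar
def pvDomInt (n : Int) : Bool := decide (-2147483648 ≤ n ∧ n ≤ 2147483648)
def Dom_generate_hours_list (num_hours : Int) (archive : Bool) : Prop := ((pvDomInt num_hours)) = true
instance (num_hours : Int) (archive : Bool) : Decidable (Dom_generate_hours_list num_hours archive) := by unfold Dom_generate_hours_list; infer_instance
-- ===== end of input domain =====

-- B replaces A's two concatenated range comprehensions (non-archive case) by one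
-- adaptive-step while loop (step 1 below hour 120, step 3 from 120); alternative
-- decomposition, same return value.

-- f"{hour:03}": decimal string zero-padded to width 3 (exact: zfill on str(n))
def pvFmt (h : Int) : String := PySem.Str.zfill (PySem.Int.toStr h) 3

-- ===== PORT A =====
def generate_hours_list (num_hours : Int) (archive : Bool) : List String :=
  if archive then
    (PySem.List.pyRange 0 (num_hours + 1) 3).map pvFmt
  else
    if num_hours ≤ 120 then
      (PySem.List.pyRange 0 (num_hours + 1) 1).map pvFmt
    else
      (PySem.List.pyRange 0 120 1).map pvFmt
        ++ (PySem.List.pyRange 120 (num_hours + 1) 3).map pvFmt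

-- ===== PORT B =====
-- the while loop: append f"{hour:03}", then advance by 1 (hour < 120) or 3.
-- 'fuel' only makes the recursion structural; it is an upper bound on the number of
-- iterations (the hour grows by at least 1 each turn), so it never cuts the loop short.
def pvAltLoop (fuel : Nat) (num_hours hour : Int) (acc : List String) : List String :=
  match fuel with
  | 0 => acc
  | fuel + 1 =>
    if hour ≤ num_hours then
      pvAltLoop fuel num_hours (hour + (if hour < 120 then 1 else 3)) (acc ++ [pvFmt hour])
    else acc

def generate_hours_list_alt (num_hours : Int) (archive : Bool) : List String :=
  if archive then
    (PySem.List.pyRange 0 (num_hours + 1) 3).map pvFmt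
  else
    pvAltLoop (num_hours + 1).toNat num_hours 0 []

-- ===== PRECONDITION & SPEC =====
def Spec_generate_hours_list (num_hours : Int) (archive : Bool) (out : List String) : Prop := out = generate_hours_list_alt num_hours archive
instance (num_hours : Int) (archive : Bool) (out : List String) : Decidable (Spec_generate_hours_list num_hours archive out) := by unfold Spec_generate_hours_list; infer_instance

-- ===== CLAIM (what is proved, stated in full; the proofs are below) =====
def Claim_equal_generate_hours_list : Prop := ∀ (num_hours : Int) (archive : Bool), Dom_generate_hours_list num_hours archive → Spec_generate_hours_list num_hours archive (generate_hours_list num_hours archive)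

-- ===== LEMMAS AND PROOFS =====

-- step-3 cons unfolding for pyRange
theorem pyRange_three_cons (a b : Int) (h : a < b) :
    PySem.List.pyRange a b 3 = a :: PySem.List.pyRange (a + 3) b 3 := by
  rw [PySem.List.pyRange_of_pos a b (by norm_num : (0:Int) < 3),
      PySem.List.pyRange_of_pos (a + 3) b (by norm_num : (0:Int) < 3)]
  by_cases h3 : a + 3 < b
  · rw [if_pos h, if_pos h3]
    have hn : ((b - a + 3 - 1) / 3).toNat = ((b - (a + 3) + 3 - 1) / 3).toNat + 1 := by omega
    rw [hn, List.range_succ_eq_map, List.map_cons, List.map_map]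
    congr 1
    · push_cast; ring
    · apply List.map_congr_left
      intro k _
      simp [Function.comp]
      ring
  · rw [if_pos h, if_neg h3]
    have hn : ((b - a + 3 - 1) / 3).toNat = 1 := by omega
    rw [hn]
    simp

theorem pyRange_three_eq_nil (a b : Int) (h : b ≤ a) :
    PySem.List.pyRange a b 3 = [] := by
  rw [PySem.List.pyRange_of_pos a b (by norm_num : (0:Int) < 3), if_neg (by omega)]
  simp

-- loop from hour ≥ 120 is the step-3 range
theorem pvAltLoop_high (n : Int) : ∀ (fuel : Nat) (hour : Int) (acc : List String),
    (n + 1 - hour).toNat ≤ fuel → 120 ≤ hour →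
    pvAltLoop fuel n hour acc = acc ++ (PySem.List.pyRange hour (n + 1) 3).map pvFmt := by
  intro fuel
  induction fuel with
  | zero =>
    intro hour acc hk h120
    rw [pvAltLoop, pyRange_three_eq_nil _ _ (by omega)]
    simp
  | succ k ih =>
    intro hour acc hk h120
    rw [pvAltLoop]
    by_cases hle : hour ≤ n
    · rw [if_pos hle, if_neg (by omega)]
      rw [ih (hour + 3) _ (by omega) (by omega)]
      rw [pyRange_three_cons hour (n + 1) (by omega)]
      simp
    · rw [if_neg hle, pyRange_three_eq_nil _ _ (by omega)]
      simp

-- loop from 0 ≤ hour ≤ 120 is the step-1 range up to min(n,119)+1 followed by the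
-- step-3 range from 120 (second part empty when n ≤ 120)
theorem pvAltLoop_low (n : Int) : ∀ (k fuel : Nat) (hour : Int) (acc : List String),
    hour = 120 - (k : Int) → 0 ≤ hour → (n + 1 - hour).toNat ≤ fuel →
    pvAltLoop fuel n hour acc = acc ++
      (if n ≤ 120 then (PySem.List.pyRange hour (n + 1) 1).map pvFmt
       else (PySem.List.pyRange hour 120 1).map pvFmt
              ++ (PySem.List.pyRange 120 (n + 1) 3).map pvFmt) := by
  intro k
  induction k with
  | zero =>
    intro fuel hour acc hhour _ hfuel
    have h120 : hour = 120 := by omega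
    subst h120
    rw [pvAltLoop_high n fuel 120 acc hfuel (by omega)]
    by_cases hle : n ≤ 120
    · rw [if_pos hle]
      by_cases h : (120 : Int) < n + 1
      · rw [pyRange_three_cons 120 (n + 1) (by omega), pyRange_three_eq_nil (120 + 3) (n + 1) (by omega),
            PySem.List.pyRange_one_cons (show (120:Int) < n + 1 by omega),
            PySem.List.pyRange_one_eq_nil (show n + 1 ≤ 120 + 1 by omega)]
      · rw [pyRange_three_eq_nil _ _ (by omega), PySem.List.pyRange_one_eq_nil (by omega)]
    · rw [if_neg hle, PySem.List.pyRange_one_eq_nil (by omega)]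
      simp
  | succ k ih =>
    intro fuel hour acc hhour hpos hfuel
    have hlt : hour < 120 := by omega
    by_cases hle : hour ≤ n
    · obtain ⟨f, rfl⟩ : ∃ f, fuel = f + 1 := ⟨fuel - 1, by omega⟩
      rw [pvAltLoop, if_pos hle, if_pos hlt]
      rw [ih f (hour + 1) _ (by omega) (by omega) (by omega)]
      by_cases h120 : n ≤ 120
      · rw [if_pos h120, if_pos h120, PySem.List.pyRange_one_cons (show hour < n + 1 by omega)]
        simp
      · rw [if_neg h120, if_neg h120, PySem.List.pyRange_one_cons (show hour < 120 by omega)]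
        simp
    · have h120 : n ≤ 120 := by omega
      have hstop : pvAltLoop fuel n hour acc = acc := by
        cases fuel with
        | zero => rw [pvAltLoop]
        | succ f => rw [pvAltLoop, if_neg hle]
      rw [hstop, if_pos h120, PySem.List.pyRange_one_eq_nil (by omega)]
      simp

-- ===== VERDICT (by name: the statement is the Claim_ definition above) =====
theorem generate_hours_list_spec : Claim_equal_generate_hours_list := by
  intro n archive _
  unfold Spec_generate_hours_list generate_hours_list generate_hours_list_alt
  cases archive with
  | true => simp
  | false =>
    simp only [Bool.false_eq_true, if_false]
    rw [pvAltLoop_low n 120 (n + 1).toNat 0 [] (by omega) (by omega) (by omega)]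
    by_cases h : n ≤ 120
    · rw [if_pos h]
      simp
    · rw [if_neg h]
      simp
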